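-- pv_equiv track=rewrite | github.com/jeff-160/picoCTF-Hard-Crypto-Writeups | college-rowing-team/solve.py | solve_hastad
-- ===== SOURCE A (Python) =====
-- def integer_nth_root(n, k):
--     if n < 0:
--         if k % 2 == 0:
--             raise ValueError("Even root of negative number")
--         return -integer_nth_root(-n, k)
--
--     low, high = 0, 1
--     while high ** k <= n:
--         high <<= 1
--
--     while low < high:
--         mid = (low + high) // 2
--         mid_k = pow(mid, k)
--         if mid_k < n:
--             low = mid + 1
--         else:
--             high = mid
--
--     return low
--
-- def solve_hastad(ciphertexts, moduli, e=3):
--     from functools import reduce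
--
--     N = reduce(lambda a, b: a*b, moduli)
--
--     result = 0
--     for i in range(len(ciphertexts)):
--         Ni = N // moduli[i]
--
--         inv = pow(Ni, -1, moduli[i])
--         result = (result + ciphertexts[i] * Ni * inv) % N
--
--     m_pow_e = result
--
--     m = integer_nth_root(m_pow_e, e)
--
--     if pow(m, e) == m_pow_e:
--         return m
--
--     for i in range(-1000, 1000):
--         test_m = m + i
--         if test_m >= 0 and pow(test_m, e) == m_pow_e:
--             return test_m
--
--     return None
-- ===== SOURCE B (Python) =====
-- def _floor_root(n, k):
--     # digit-by-digit (MSB-first) integer floor k-th root of n >= 0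
--     if n == 0:
--         return 0
--     r = 0
--     for i in range(n.bit_length() // k, -1, -1):
--         c = r + (1 << i)
--         if c ** k <= n:
--             r = c
--     return r
--
-- def solve_hastad(ciphertexts, moduli, e=3):
--     N = 1
--     for q in moduli:
--         N *= q
--     total = sum(c * (N // q) * pow(N // q, -1, q) for c, q in zip(ciphertexts, moduli))
--     n = total % N
--     a = abs(n)
--     r = _floor_root(a, e)
--     if r ** e == a:
--         return r if n >= 0 else -r
--     return None
-- ===== Notes on version B (the rewrite author's own statement) =====
-- stated objective: simpler
-- what changed: B computes the CRT sum in one pass over zip with a single final mod (instead of index-loop with per-step reduction), finds the integer e-th root digit-by-digit from the most significant bit (instead of exponential-growth plus binary search), and drops A's dead +/-1000 fallback loop, which provably never returns because the root A computes is the unique candidate.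
-- outside the precondition, e.g. on solve_hastad([], [0], 3): A returns 0, B raises ZeroDivisionError; on solve_hastad([0], [-5], 2): A returns 0, B returns 0
import Mathlib
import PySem

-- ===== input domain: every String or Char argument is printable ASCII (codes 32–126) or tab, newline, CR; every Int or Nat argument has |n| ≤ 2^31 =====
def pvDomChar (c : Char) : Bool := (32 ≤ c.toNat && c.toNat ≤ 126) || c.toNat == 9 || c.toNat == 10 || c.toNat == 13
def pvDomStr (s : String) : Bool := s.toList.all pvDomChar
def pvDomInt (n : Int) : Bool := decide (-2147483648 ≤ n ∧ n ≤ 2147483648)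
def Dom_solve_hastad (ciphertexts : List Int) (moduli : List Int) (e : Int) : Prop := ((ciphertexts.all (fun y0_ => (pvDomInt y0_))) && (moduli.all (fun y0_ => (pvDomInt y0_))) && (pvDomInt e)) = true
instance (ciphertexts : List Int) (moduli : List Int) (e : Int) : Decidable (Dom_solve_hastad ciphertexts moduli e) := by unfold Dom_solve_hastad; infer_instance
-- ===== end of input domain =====

-- B replaces A's per-step-reduced CRT index loop, grow-then-binary-search root and the ±1000
-- fallback (which provably never returns) by a zip/sum CRT pass with one final mod and an
-- MSB-first digit-by-digit root (objective: simpler).  Neither version mutates its arguments.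

-- ===== PORT A =====
-- shared helper for the Python built-in pow(a, -1, m) (modular inverse, Python's
-- representative having the sign of the modulus); both Pythons call this built-in with
-- the same arguments.  Exact for a invertible mod m (guaranteed by Pre_); Python raises
-- ValueError on a non-invertible a, excluded by Pre_.
-- extended Euclid: Bézout coefficient s0 of r0 (invariant r0 ≡ s0·a mod |m|)
def xgcdA (r0 : Nat) (s0 : Int) (r1 : Nat) (s1 : Int) : Int :=
  if _h : r1 = 0 then s0
  else xgcdA r1 s1 (r0 % r1) (s0 - (r0 / r1 : Nat) * s1)
termination_by r1
decreasing_by exact Nat.mod_lt _ (by omega)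

def pyModInv (a m : Int) : Int :=
  PySem.Int.mod (xgcdA (Int.emod a (m.natAbs : Int)).toNat 1 m.natAbs 0) m

-- while high ** k <= n: high <<= 1   (fuel n+1 suffices for k ≥ 1; Python diverges for k = 0, excluded by Pre_)
def growA (n k : Nat) : Nat → Nat → Nat
  | 0, high => high
  | fuel+1, high => if high ^ k ≤ n then growA n k fuel (2 * high) else high

-- while low < high: mid = (low+high)//2; …
def bsA (n k low high : Nat) : Nat :=
  if _h : low < high then
    let mid := (low + high) / 2
    if mid ^ k < n then bsA n k (mid + 1) high else bsA n k low mid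
  else low
termination_by high - low
decreasing_by all_goals omega

def integer_nth_root (n k : Int) : Int :=
  if _h : n < 0 then
    if PySem.Int.mod k 2 = 0 then 0  -- Python: raise ValueError; unreachable under Pre_
    else - integer_nth_root (-n) k
  else
    Int.ofNat (bsA n.toNat k.toNat 0 (growA n.toNat k.toNat (n.toNat + 1) 1))
termination_by (if n < 0 then 1 else 0)
decreasing_by simp_all; omega

def solve_hastad (ciphertexts : List Int) (moduli : List Int) (e : Int) : Option Int :=
  -- N = reduce(lambda a, b: a*b, moduli)  (Python raises TypeError on []; unreachable under Pre_)
  let N : Int := match moduli with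
    | [] => 0
    | h :: t => t.foldl (· * ·) h
  -- list indexing is in range under Pre_ (Python raises IndexError outside it)
  let result := (List.range ciphertexts.length).foldl
    (fun result i =>
      let Ni := PySem.Int.floordiv N (moduli.getD i 0)
      let inv := pyModInv Ni (moduli.getD i 0)
      PySem.Int.mod (result + ciphertexts.getD i 0 * Ni * inv) N) 0
  let m := integer_nth_root result e
  if m ^ e.toNat = result then some m
  else
    match (PySem.List.pyRange (-1000) 1000 1).find?
        (fun i => decide (0 ≤ m + i) && decide ((m + i) ^ e.toNat = result)) with
    | some i => some (m + i)
    | none => none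

-- ===== PORT B =====
-- for i in range(n.bit_length() // k, -1, -1): c = r + (1 << i); if c ** k <= n: r = c
def bitLoopB (n k : Nat) : Nat → Nat → Nat
  | 0, r => r
  | i+1, r =>
    let c := r + 2 ^ i
    bitLoopB n k i (if c ^ k ≤ n then c else r)

def floor_root (n k : Int) : Int :=
  if n = 0 then 0
  else Int.ofNat (bitLoopB n.toNat k.toNat (Nat.size n.toNat / k.toNat + 1) 0)

def solve_hastad_alt (ciphertexts : List Int) (moduli : List Int) (e : Int) : Option Int :=
  let N : Int := moduli.foldl (· * ·) 1
  let total := ((ciphertexts.zip moduli).map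
    (fun p => p.1 * PySem.Int.floordiv N p.2 * pyModInv (PySem.Int.floordiv N p.2) p.2)).sum
  let n := PySem.Int.mod total N
  let a := |n|
  let r := floor_root a e
  if r ^ e.toNat = a then (if 0 ≤ n then some r else some (-r)) else none

-- ===== PRECONDITION & SPEC =====
-- Pre_ excludes exactly the inputs where A raises or diverges: empty moduli (TypeError in
-- reduce), a zero modulus (ZeroDivisionError), more ciphertexts than moduli (IndexError),
-- a non-invertible N//m_i (ValueError in pow), e ≤ 0 (the doubling loop diverges / float pow),
-- and an even e with a negative modulus product (ValueError "Even root of negative number");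
-- the last clause also excludes the corner with CRT residue 0, where A still returns (cited
-- in the claim with an example on which A and B agree).
def Pre_solve_hastad (ciphertexts : List Int) (moduli : List Int) (e : Int) : Prop :=
  moduli ≠ [] ∧ (∀ q ∈ moduli, q ≠ 0) ∧ ciphertexts.length ≤ moduli.length ∧ 1 ≤ e ∧
  ((2 : Int) ∣ e → 0 < moduli.foldl (· * ·) 1) ∧
  (∀ i ∈ List.range ciphertexts.length,
    Int.gcd (PySem.Int.floordiv (moduli.foldl (· * ·) 1) (moduli.getD i 0)) (moduli.getD i 0) = 1)
instance (ciphertexts : List Int) (moduli : List Int) (e : Int) : Decidable (Pre_solve_hastad ciphertexts moduli e) := by unfold Pre_solve_hastad; infer_instance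

def pvWitness_solve_hastad : List Int × List Int × Int := ([8], [100], 3)

def Spec_solve_hastad (ciphertexts : List Int) (moduli : List Int) (e : Int) (out : Option Int) : Prop := out = solve_hastad_alt ciphertexts moduli e
instance (ciphertexts : List Int) (moduli : List Int) (e : Int) (out : Option Int) : Decidable (Spec_solve_hastad ciphertexts moduli e out) := by unfold Spec_solve_hastad; infer_instance

-- ===== CLAIM (what is proved, stated in full; the proofs are below) =====
def Claim_equal_solve_hastad : Prop := ∀ (ciphertexts : List Int) (moduli : List Int) (e : Int), Dom_solve_hastad ciphertexts moduli e → Pre_solve_hastad ciphertexts moduli e → Spec_solve_hastad ciphertexts moduli e (solve_hastad ciphertexts moduli e)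

-- ===== LEMMAS AND PROOFS =====

-- ---- the CRT value ----

lemma foldl_one_mul (h : Int) (t : List Int) :
    (h :: t).foldl (· * ·) 1 = t.foldl (· * ·) h := by
  simp [List.foldl_cons]

-- Python's % depends only on the residue class (any nonzero divisor)
lemma mod_congr (b x y : Int) (hb : b ≠ 0) (h : b ∣ (x - y)) :
    PySem.Int.mod x b = PySem.Int.mod y b := by
  obtain ⟨c, hc⟩ := h
  have hx := PySem.Int.floordiv_mul_add_mod x b
  have hy := PySem.Int.floordiv_mul_add_mod y b
  set mx := PySem.Int.mod x b with hmx
  set my := PySem.Int.mod y b with hmy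
  have hdiff : mx - my = b * (c - PySem.Int.floordiv x b + PySem.Int.floordiv y b) := by
    ring_nf
    nlinarith [hx, hy, hc]
  have hbounds : -|b| < mx - my ∧ mx - my < |b| := by
    rcases lt_or_gt_of_ne hb with hneg | hpos
    · have b1 := PySem.Int.mod_neg_bounds x hneg
      have b2 := PySem.Int.mod_neg_bounds y hneg
      rw [abs_of_neg hneg]; constructor <;> omega
    · have b1 := PySem.Int.mod_nonneg x hpos
      have b2 := PySem.Int.mod_nonneg y hpos
      have b3 := PySem.Int.mod_lt x hpos
      have b4 := PySem.Int.mod_lt y hpos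
      rw [abs_of_pos hpos]; constructor <;> omega
  set k := c - PySem.Int.floordiv x b + PySem.Int.floordiv y b with hk
  have hk0 : k = 0 := by
    by_contra hk0
    have h1 : (1 : Int) ≤ |k| := by rcases abs_cases k with ⟨h1, _⟩ | ⟨h1, _⟩ <;> omega
    have h2 : |b| * 1 ≤ |b| * |k| := mul_le_mul_of_nonneg_left h1 (abs_nonneg b)
    have habs : |mx - my| = |b| * |k| := by rw [hdiff, abs_mul]
    have h3 : |b| ≤ |mx - my| := by rw [habs]; omega
    have h4 := abs_lt.mpr ⟨hbounds.1, hbounds.2⟩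
    omega
  rw [hk0, mul_zero] at hdiff
  omega

lemma mod_step (b s x : Int) (hb : b ≠ 0) :
    PySem.Int.mod (PySem.Int.mod s b + x) b = PySem.Int.mod (s + x) b := by
  apply mod_congr b _ _ hb
  have hx := PySem.Int.floordiv_mul_add_mod s b
  exact ⟨-(PySem.Int.floordiv s b), by linarith [hx]⟩

-- A's per-step-reduced accumulator equals one final reduction of the plain sum
lemma foldl_mod_sum (b : Int) (hb : b ≠ 0) :
    ∀ (ts : List Int) (s : Int),
      ts.foldl (fun a x => PySem.Int.mod (a + x) b) (PySem.Int.mod s b)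
        = PySem.Int.mod (s + ts.sum) b := by
  intro ts
  induction ts with
  | nil => intro s; simp
  | cons t ts ih =>
    intro s
    simp only [List.foldl_cons, List.sum_cons]
    rw [mod_step b s t hb, ih (s + t)]
    ring_nf

-- A's fold over range(len(ciphertexts)) with indexing is B's fold over the zip
lemma foldl_range_zip {α : Type} (g : α → Int → Int → α) :
    ∀ (cs ms : List Int) (init : α), cs.length ≤ ms.length →
      (List.range cs.length).foldl (fun a i => g a (cs.getD i 0) (ms.getD i 0)) init
        = (cs.zip ms).foldl (fun a p => g a p.1 p.2) init := by
  intro cs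
  induction cs with
  | nil => intro ms init _; simp
  | cons c cs ih =>
    intro ms init hlen
    match ms with
    | [] => simp at hlen
    | m :: ms =>
      simp only [List.length_cons, List.range_succ_eq_map, List.foldl_cons, List.foldl_map,
        List.getD_cons_zero, List.zip_cons_cons]
      have heq : (fun (a : α) (i : Nat) => g a ((c :: cs).getD (i + 1) 0) ((m :: ms).getD (i + 1) 0))
           = (fun (a : α) (i : Nat) => g a (cs.getD i 0) (ms.getD i 0)) := by
        funext a i; simp
      rw [heq]
      exact ih ms (g init c m) (by simpa using hlen)

lemma mod_zero_left (b : Int) : PySem.Int.mod 0 b = 0 := by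
  simp [PySem.Int.mod]

lemma foldl_ne_zero (l : List Int) (h : ∀ q ∈ l, q ≠ 0) : l.foldl (· * ·) 1 ≠ 0 := by
  rw [← List.prod_eq_foldl]
  exact List.prod_ne_zero (fun h0 => (h 0 h0) rfl)

-- ---- roots, A side ----

lemma growA_spec (n k : Nat) (hk : 1 ≤ k) :
    ∀ fuel high, 1 ≤ high → n < 2 ^ fuel * high → n < (growA n k fuel high) ^ k := by
  intro fuel
  induction fuel with
  | zero =>
    intro high h1 h2
    simp only [growA]
    simp only [pow_zero, one_mul] at h2
    calc n < high := h2
      _ ≤ high ^ k := Nat.le_self_pow (by omega) high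
  | succ fuel ih =>
    intro high h1 h2
    simp only [growA]
    split
    · refine ih (2 * high) (by omega) ?_
      have he : 2 ^ (fuel + 1) * high = 2 ^ fuel * (2 * high) := by ring
      omega
    · omega

lemma bsA_spec_fuel (n k : Nat) : ∀ d low high, high - low ≤ d → low ≤ high →
    (∀ m < low, m ^ k < n) → n ≤ high ^ k →
    (∀ m < bsA n k low high, m ^ k < n) ∧ n ≤ (bsA n k low high) ^ k := by
  intro d
  induction d with
  | zero =>
    intro low high hd hle hlow hhigh
    have : low = high := by omega
    rw [bsA]
    simp only [this, lt_irrefl, dite_false]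
    exact ⟨this ▸ hlow, this ▸ hhigh⟩
  | succ d ih =>
    intro low high hd hle hlow hhigh
    rw [bsA]
    by_cases h : low < high
    · simp only [dif_pos h]
      by_cases h2 : ((low + high) / 2) ^ k < n
      · simp only [if_pos h2]
        refine ih ((low + high) / 2 + 1) high (by omega) (by omega) ?_ hhigh
        intro m hm
        calc m ^ k ≤ ((low + high) / 2) ^ k := Nat.pow_le_pow_left (by omega) k
          _ < n := h2
      · simp only [if_neg h2]
        exact ih low ((low + high) / 2) (by omega) (by omega) hlow (by omega)
    · simp only [dif_neg h]
      have : low = high := by omega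
      exact ⟨hlow, this ▸ hhigh⟩

lemma bsA_spec (n k : Nat) (low high : Nat) (hle : low ≤ high)
    (hlow : ∀ m < low, m ^ k < n) (hhigh : n ≤ high ^ k) :
    (∀ m < bsA n k low high, m ^ k < n) ∧ n ≤ (bsA n k low high) ^ k :=
  bsA_spec_fuel n k (high - low) low high le_rfl hle hlow hhigh

-- on a nonnegative argument A's helper returns the least m with m ** k ≥ n
lemma introot_spec (n e : Int) (hn : 0 ≤ n) (he : 1 ≤ e) :
    ∃ L : Nat, integer_nth_root n e = (L : Int) ∧
      (∀ m < L, m ^ e.toNat < n.toNat) ∧ n.toNat ≤ L ^ e.toNat := by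
  rw [integer_nth_root]
  rw [dif_neg (by omega)]
  refine ⟨_, rfl, ?_⟩
  have hk : 1 ≤ e.toNat := by omega
  have hgrow : n.toNat ≤ (growA n.toNat e.toNat (n.toNat + 1) 1) ^ e.toNat := by
    have := growA_spec n.toNat e.toNat hk (n.toNat + 1) 1 le_rfl
      (by
        have h1 : n.toNat < 2 ^ n.toNat := Nat.lt_two_pow_self
        have h2 : (2 : Nat) ^ n.toNat ≤ 2 ^ (n.toNat + 1) := Nat.pow_le_pow_right (by omega) (by omega)
        omega)
    omega
  exact bsA_spec n.toNat e.toNat 0 _ (Nat.zero_le _) (by omega) hgrow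

lemma introot_neg (n e : Int) (hn : n < 0) (hne : ¬ (2 : Int) ∣ e) :
    integer_nth_root n e = - integer_nth_root (-n) e := by
  rw [integer_nth_root, dif_pos hn, if_neg (by rw [PySem.Int.mod_eq_zero_iff_dvd]; exact hne)]

-- ---- roots, B side ----

lemma bitLoopB_spec (n k : Nat) :
    ∀ j r, r ^ k ≤ n → n < (r + 2 ^ j) ^ k →
      (bitLoopB n k j r) ^ k ≤ n ∧ n < (bitLoopB n k j r + 1) ^ k := by
  intro j
  induction j with
  | zero =>
    intro r h1 h2
    simp only [bitLoopB]
    simpa using ⟨h1, by simpa using h2⟩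
  | succ j ih =>
    intro r h1 h2
    simp only [bitLoopB]
    split
    · apply ih
      · assumption
      · have he : r + 2 ^ j + 2 ^ j = r + 2 ^ (j + 1) := by ring
        rw [he]; exact h2
    · apply ih _ h1
      omega

-- on a nonnegative argument B's helper returns the integer floor root
lemma floor_root_spec (n e : Int) (hn : 0 ≤ n) (he : 1 ≤ e) :
    ∃ R : Nat, floor_root n e = (R : Int) ∧
      R ^ e.toNat ≤ n.toNat ∧ n.toNat < (R + 1) ^ e.toNat := by
  have hk : 1 ≤ e.toNat := by omega
  rw [floor_root]
  by_cases h0 : n = 0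
  · have hz : 0 < e.toNat := by omega
    refine ⟨0, by rw [if_pos h0]; rfl, ?_, by rw [h0]; norm_num⟩
    rw [h0, Nat.zero_pow hz]
    simp
  · rw [if_neg h0]
    refine ⟨_, rfl, ?_⟩
    apply bitLoopB_spec
    · have hz : 0 < e.toNat := by omega
      rw [Nat.zero_pow hz]
      exact Nat.zero_le _
    · set k := e.toNat
      set s := Nat.size n.toNat with hs
      have hdm := Nat.div_add_mod s k
      have hmlt : s % k < k := Nat.mod_lt _ (by omega)
      have hsle : s ≤ (s / k + 1) * k := by nlinarith [hdm, hmlt]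
      have h1 : n.toNat < 2 ^ s := Nat.lt_size_self _
      have h2 : (2 : Nat) ^ s ≤ 2 ^ ((s / k + 1) * k) := Nat.pow_le_pow_right (by omega) hsle
      have h3 : (2 : Nat) ^ ((s / k + 1) * k) = (2 ^ (s / k + 1)) ^ k := pow_mul 2 _ _
      simp only [Nat.zero_add]
      omega

-- A's least root and B's floor root agree on the perfect-power test and are equal there
lemma root_rel (nn k L R : Nat) (hk : 1 ≤ k)
    (hL1 : ∀ m < L, m ^ k < nn) (hL2 : nn ≤ L ^ k)
    (hR1 : R ^ k ≤ nn) (hR2 : nn < (R + 1) ^ k) :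
    (R ^ k = nn → L = R) ∧ (R ^ k ≠ nn → L ^ k ≠ nn) := by
  constructor
  · intro hperf
    rcases lt_trichotomy L R with h | h | h
    · have : L ^ k < R ^ k := Nat.pow_lt_pow_left h (by omega)
      omega
    · exact h
    · have := hL1 R h
      omega
  · intro hnp
    have hRL : R < L := by
      by_contra hc
      have : L ^ k ≤ R ^ k := Nat.pow_le_pow_left (by omega) k
      omega
    have hLR1 : L ≤ R + 1 := by
      by_contra hc
      have := hL1 (R + 1) (by omega)
      omega
    have hLeq : L = R + 1 := by omega
    rw [hLeq]
    omega

-- ---- the tails of both programs agree on the common CRT value ----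

lemma tail_eq (n e : Int) (he : 1 ≤ e) (hne : (2 : Int) ∣ e → 0 ≤ n) :
    (if integer_nth_root n e ^ e.toNat = n then some (integer_nth_root n e)
     else
       match (PySem.List.pyRange (-1000) 1000 1).find?
           (fun i => decide (0 ≤ integer_nth_root n e + i) &&
                     decide ((integer_nth_root n e + i) ^ e.toNat = n)) with
       | some i => some (integer_nth_root n e + i)
       | none => none)
    = (if floor_root |n| e ^ e.toNat = |n| then
         (if 0 ≤ n then some (floor_root |n| e) else some (-(floor_root |n| e)))
       else none) := by
  have hk : 1 ≤ e.toNat := by omega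
  by_cases hn : 0 ≤ n
  · -- nonnegative residue
    have habs : |n| = n := abs_of_nonneg hn
    obtain ⟨L, hL, hL1, hL2⟩ := introot_spec n e hn he
    obtain ⟨R, hR, hR1, hR2⟩ := floor_root_spec n e hn he
    have hrel := root_rel n.toNat e.toNat L R hk hL1 hL2 hR1 hR2
    have hcastn : ((n.toNat : Int)) = n := Int.toNat_of_nonneg hn
    have hcondA : (integer_nth_root n e ^ e.toNat = n) ↔ L ^ e.toNat = n.toNat := by
      rw [hL, ← hcastn]
      constructor <;> intro h <;> exact_mod_cast h
    have hcondB : (floor_root |n| e ^ e.toNat = |n|) ↔ R ^ e.toNat = n.toNat := by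
      rw [habs, hR, ← hcastn]
      constructor <;> intro h <;> exact_mod_cast h
    by_cases hperf : R ^ e.toNat = n.toNat
    · rw [if_pos (hcondB.mpr hperf), if_pos (hcondA.mpr (by rw [hrel.1 hperf]; exact hperf)),
        if_pos hn, hL, habs, hR, hrel.1 hperf]
    · have hA : ¬ (integer_nth_root n e ^ e.toNat = n) := fun h => (hrel.2 hperf) (hcondA.mp h)
      rw [if_neg (fun h => hperf (hcondB.mp h)), if_neg hA]
      have hfind : (PySem.List.pyRange (-1000) 1000 1).find?
           (fun i => decide (0 ≤ integer_nth_root n e + i) &&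
                     decide ((integer_nth_root n e + i) ^ e.toNat = n)) = none := by
        rw [List.find?_eq_none]
        intro i _ hcontr
        rw [Bool.and_eq_true, decide_eq_true_eq, decide_eq_true_eq] at hcontr
        obtain ⟨hpos, hval⟩ := hcontr
        set t := (integer_nth_root n e + i).toNat with ht
        have htcast : ((t : Int)) = integer_nth_root n e + i := Int.toNat_of_nonneg hpos
        have htk : t ^ e.toNat = n.toNat := by
          have hv : ((t : Int)) ^ e.toNat = n := by rw [htcast]; exact hval
          rw [← hcastn] at hv
          exact_mod_cast hv
        have htle : t < R + 1 := by
          by_contra hc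
          have := Nat.pow_le_pow_left (by omega : R + 1 ≤ t) e.toNat
          omega
        rcases Nat.lt_or_ge t R with h | h
        · have : t ^ e.toNat < R ^ e.toNat := Nat.pow_lt_pow_left h (by omega)
          omega
        · have : t = R := by omega
          rw [this] at htk
          exact hperf htk
      rw [hfind]
  · -- negative residue: e is odd by Pre_
    push_neg at hn
    have hodd2 : ¬ (2 : Int) ∣ e := fun h => absurd (hne h) (by omega)
    have hoddk : Odd e.toNat := by
      rcases Int.even_or_odd e with h | h
      · exact absurd h.two_dvd hodd2
      · obtain ⟨c, hc⟩ := h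
        exact ⟨c.toNat, by omega⟩
    have hnn : (0 : Int) ≤ -n := by omega
    obtain ⟨L, hL, hL1, hL2⟩ := introot_spec (-n) e hnn he
    obtain ⟨R, hR, hR1, hR2⟩ := floor_root_spec (-n) e hnn he
    have hrel := root_rel (-n).toNat e.toNat L R hk hL1 hL2 hR1 hR2
    have habs : |n| = -n := abs_of_neg hn
    have hroot : integer_nth_root n e = - (L : Int) := by
      rw [introot_neg n e hn hodd2, hL]
    have hcastn : (((-n).toNat : Int)) = -n := Int.toNat_of_nonneg hnn
    have hcondA : (integer_nth_root n e ^ e.toNat = n) ↔ L ^ e.toNat = (-n).toNat := by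
      rw [hroot, hoddk.neg_pow]
      constructor
      · intro h
        have hv : ((L : Int)) ^ e.toNat = -n := by omega
        rw [← hcastn] at hv; exact_mod_cast hv
      · intro h
        have hv : ((L : Int)) ^ e.toNat = -n := by rw [← hcastn]; exact_mod_cast h
        omega
    have hcondB : (floor_root |n| e ^ e.toNat = |n|) ↔ R ^ e.toNat = (-n).toNat := by
      rw [habs, hR, ← hcastn]
      constructor <;> intro h <;> exact_mod_cast h
    by_cases hperf : R ^ e.toNat = (-n).toNat
    · rw [if_pos (hcondB.mpr hperf), if_pos (hcondA.mpr (by rw [hrel.1 hperf]; exact hperf)),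
        if_neg (by omega : ¬ (0 : Int) ≤ n), hroot, habs, hR, hrel.1 hperf]
    · have hA : ¬ (integer_nth_root n e ^ e.toNat = n) := fun h => (hrel.2 hperf) (hcondA.mp h)
      rw [if_neg (fun h => hperf (hcondB.mp h)), if_neg hA]
      have hfind : (PySem.List.pyRange (-1000) 1000 1).find?
           (fun i => decide (0 ≤ integer_nth_root n e + i) &&
                     decide ((integer_nth_root n e + i) ^ e.toNat = n)) = none := by
        rw [List.find?_eq_none]
        intro i _ hcontr
        rw [Bool.and_eq_true, decide_eq_true_eq, decide_eq_true_eq] at hcontr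
        obtain ⟨hpos, hval⟩ := hcontr
        have : (0 : Int) ≤ (integer_nth_root n e + i) ^ e.toNat := pow_nonneg hpos _
        omega
      rw [hfind]

-- ---- assembly ----

lemma foldl_modadd (N : Int) (hN : N ≠ 0) (f : Int × Int → Int) (l : List (Int × Int)) :
    l.foldl (fun a p => PySem.Int.mod (a + f p) N) 0 = PySem.Int.mod (l.map f).sum N := by
  have h1 : (l.map f).foldl (fun a x => PySem.Int.mod (a + x) N) 0
      = l.foldl (fun a p => PySem.Int.mod (a + f p) N) 0 := by rw [List.foldl_map]
  rw [← h1]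
  match hm : l.map f with
  | [] => simp [mod_zero_left]
  | x :: ts =>
    simp only [List.foldl_cons, List.sum_cons]
    rw [foldl_mod_sum N hN ts (0 + x)]
    ring_nf

lemma crt_eq (cs : List Int) (h : Int) (t : List Int) (hlen : cs.length ≤ (h :: t).length)
    (hN : (h :: t).foldl (· * ·) 1 ≠ 0) :
    (List.range cs.length).foldl
      (fun result i =>
        PySem.Int.mod (result + cs.getD i 0
          * PySem.Int.floordiv (t.foldl (· * ·) h) ((h :: t).getD i 0)
          * pyModInv (PySem.Int.floordiv (t.foldl (· * ·) h) ((h :: t).getD i 0)) ((h :: t).getD i 0))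
          ((t.foldl (· * ·) h))) 0
    = PySem.Int.mod
        ((cs.zip (h :: t)).map
          (fun p => p.1 * PySem.Int.floordiv ((h :: t).foldl (· * ·) 1) p.2
            * pyModInv (PySem.Int.floordiv ((h :: t).foldl (· * ·) 1) p.2) p.2)).sum
        ((h :: t).foldl (· * ·) 1) := by
  rw [foldl_one_mul] at hN ⊢
  set N := t.foldl (· * ·) h with hNdef
  rw [foldl_range_zip (fun a c m =>
    PySem.Int.mod (a + c * PySem.Int.floordiv N m * pyModInv (PySem.Int.floordiv N m) m) N)
    cs (h :: t) 0 hlen]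
  exact foldl_modadd N hN
    (fun p => p.1 * PySem.Int.floordiv N p.2 * pyModInv (PySem.Int.floordiv N p.2) p.2) _

-- ===== VERDICT (by name: the statement is the Claim_ definition above) =====
set_option maxRecDepth 10000 in
theorem solve_hastad_spec : Claim_equal_solve_hastad := by
  intro cs ms e _ hpre
  obtain ⟨hms, hz, hlen, he, heven, _hinv⟩ := hpre
  unfold Spec_solve_hastad
  match ms, hms with
  | h :: t, _ =>
    have hN : (h :: t).foldl (· * ·) 1 ≠ 0 := foldl_ne_zero _ hz
    show solve_hastad cs (h :: t) e = solve_hastad_alt cs (h :: t) e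
    unfold solve_hastad solve_hastad_alt
    simp only []
    rw [crt_eq cs h t hlen hN]
    apply tail_eq _ e he
    intro h2
    exact PySem.Int.mod_nonneg _ (heven h2)
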